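-- pv_equiv track=rewrite | github.com/elikrok/cmmc_tool | scanner/config_checker.py | _eos_management_controls
-- ===== SOURCE A (Python) =====
-- def _eos_management_controls(lines):
--     ssh_enabled = any(l.strip().lower() == 'management ssh' for l in lines)
--     mgmt_iface_present = any(l.strip().lower().startswith(('interface management1', 'interface management 1')) for l in lines)
--     in_mgmt1 = False
--     mgmt_acl_bound = False
--     for raw in lines:
--         line = raw.rstrip()
--         low = line.strip().lower()
--         if low.startswith(('interface management1', 'interface management 1')):
--             in_mgmt1 = True
--             continue
--         if in_mgmt1 and low.startswith(('interface ', 'line ', 'router ', 'hostname', 'aaa ', 'ip ')):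
--             in_mgmt1 = False
--         if in_mgmt1 and ' ip access-group ' in low:
--             mgmt_acl_bound = True
--     return {'ssh_enabled': ssh_enabled, 'mgmt_acl_bound': mgmt_acl_bound, 'mgmt_iface_present': mgmt_iface_present}
-- ===== SOURCE B (Python) =====
-- def _eos_management_controls(lines):
--     # Declarative reformulation: a stripped/lowered line binds the mgmt ACL iff it
--     # contains ' ip access-group ', is itself neither a Management1 header nor a
--     # section boundary, and the NEAREST PRECEDING header-or-boundary line is a
--     # Management1 header (found by a per-candidate backward search instead of a
--     # forward state machine).
--     HEADER = ('interface management1', 'interface management 1')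
--     BOUNDARY = ('interface ', 'line ', 'router ', 'hostname', 'aaa ', 'ip ')
--     lows = [l.strip().lower() for l in lines]
--     ssh_enabled = 'management ssh' in lows
--     mgmt_iface_present = any(l.startswith(HEADER) for l in lows)
--
--     def in_block(j):
--         for k in range(j - 1, -1, -1):
--             if lows[k].startswith(HEADER):
--                 return True
--             if lows[k].startswith(BOUNDARY):
--                 return False
--         return False
--
--     mgmt_acl_bound = any(
--         ' ip access-group ' in lows[j]
--         and not lows[j].startswith(HEADER)
--         and not lows[j].startswith(BOUNDARY)
--         and in_block(j)
--         for j in range(len(lows)))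
--     return {'ssh_enabled': ssh_enabled, 'mgmt_acl_bound': mgmt_acl_bound, 'mgmt_iface_present': mgmt_iface_present}
-- ===== Notes on version B (the rewrite author's own statement) =====
-- stated objective: alternative
-- what changed: Replaces A's forward state machine (in_mgmt1 flag mutated line by line, with strip().lower() recomputed in three passes) with a declarative characterisation: lines are stripped/lowered once into a list, and a line binds the mgmt ACL iff it contains ' ip access-group ', is neither a Management1 header nor a section boundary, and a per-candidate backward search finds a Management1 header as the nearest preceding header-or-boundary line.
import Mathlib
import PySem

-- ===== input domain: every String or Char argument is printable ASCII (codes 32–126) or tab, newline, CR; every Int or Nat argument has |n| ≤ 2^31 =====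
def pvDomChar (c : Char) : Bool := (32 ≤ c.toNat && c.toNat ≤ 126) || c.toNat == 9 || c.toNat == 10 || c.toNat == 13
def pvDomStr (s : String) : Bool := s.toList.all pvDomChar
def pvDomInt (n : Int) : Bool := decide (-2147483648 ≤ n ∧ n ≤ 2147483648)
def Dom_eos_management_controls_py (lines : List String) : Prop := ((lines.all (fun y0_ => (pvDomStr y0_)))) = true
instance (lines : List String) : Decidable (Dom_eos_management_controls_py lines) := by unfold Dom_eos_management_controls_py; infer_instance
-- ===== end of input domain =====

-- B replaces A's forward in_mgmt1 state machine by a declarative rule: a line binds the ACL iff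
-- the nearest preceding header-or-boundary line (found by a backward search) is a Management1 header.

-- shared string predicates (the same literal tuples both Pythons test)
def eosLow (s : String) : String := PySem.Str.lower (PySem.Str.strip s)
def eosIsHeader (low : String) : Bool :=
  PySem.Str.startswith low "interface management1" || PySem.Str.startswith low "interface management 1"
def eosIsBound (low : String) : Bool :=
  PySem.Str.startswith low "interface " || PySem.Str.startswith low "line " ||
  PySem.Str.startswith low "router " || PySem.Str.startswith low "hostname" ||
  PySem.Str.startswith low "aaa " || PySem.Str.startswith low "ip "
def eosHasAcl (low : String) : Bool := PySem.Str.isIn " ip access-group " low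

-- ===== PORT A =====
-- loop body of A's for-loop; state = (in_mgmt1, mgmt_acl_bound)
def eosAStep (st : Bool × Bool) (raw : String) : Bool × Bool :=
  let line := PySem.Str.rstrip raw
  let low := PySem.Str.lower (PySem.Str.strip line)
  if eosIsHeader low then (true, st.2)   -- continue
  else
    let in1 := if st.1 && eosIsBound low then false else st.1
    let acl := if in1 && eosHasAcl low then true else st.2
    (in1, acl)

def eos_management_controls_py (lines : List String) : List (String × Bool) :=
  let ssh_enabled := lines.any (fun l => PySem.Str.lower (PySem.Str.strip l) == "management ssh")
  let mgmt_iface_present := lines.any (fun l => eosIsHeader (PySem.Str.lower (PySem.Str.strip l)))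
  let st := lines.foldl eosAStep (false, false)
  [("ssh_enabled", ssh_enabled), ("mgmt_acl_bound", st.2), ("mgmt_iface_present", mgmt_iface_present)]

-- ===== PORT B =====
-- B's in_block(j): 'for k in range(j-1, -1, -1)' walks the prefix back-to-front,
-- i.e. structural recursion over the REVERSED prefix (exact transcription of the backward loop)
def eosInBlock : List String → Bool
  | [] => false
  | l :: rest => if eosIsHeader l then true else if eosIsBound l then false else eosInBlock rest

def eos_management_controls_py_alt (lines : List String) : List (String × Bool) :=
  let lows := lines.map eosLow
  let ssh_enabled := lows.contains "management ssh"
  let mgmt_iface_present := lows.any eosIsHeader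
  -- lows[j] with 0 ≤ j < len(lows): List.getD is exact here
  let mgmt_acl_bound := (List.range lows.length).any (fun j =>
    let lj := lows.getD j ""
    eosHasAcl lj && !eosIsHeader lj && !eosIsBound lj && eosInBlock ((lows.take j).reverse))
  [("ssh_enabled", ssh_enabled), ("mgmt_acl_bound", mgmt_acl_bound), ("mgmt_iface_present", mgmt_iface_present)]

-- ===== PRECONDITION & SPEC =====
def Spec_eos_management_controls_py (lines : List String) (out : List (String × Bool)) : Prop := out = eos_management_controls_py_alt lines
instance (lines : List String) (out : List (String × Bool)) : Decidable (Spec_eos_management_controls_py lines out) := by unfold Spec_eos_management_controls_py; infer_instance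

-- ===== CLAIM (what is proved, stated in full; the proofs are below) =====
def Claim_equal_eos_management_controls_py : Prop := ∀ (lines : List String), Dom_eos_management_controls_py lines → Spec_eos_management_controls_py lines (eos_management_controls_py lines)

-- ===== LEMMAS AND PROOFS =====

-- A's step expressed over the stripped/lowered line (rstrip before strip is a no-op)
def eosStepL (st : Bool × Bool) (low : String) : Bool × Bool :=
  if eosIsHeader low then (true, st.2)
  else
    let in1 := if st.1 && eosIsBound low then false else st.1
    let acl := if in1 && eosHasAcl low then true else st.2
    (in1, acl)

-- dropping a whitespace suffix and a whitespace prefix commute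
theorem eos_dropWhile_rdropWhile_comm {α : Type} (p : α → Bool) (l : List α) :
    List.dropWhile p (List.rdropWhile p l) = List.rdropWhile p (List.dropWhile p l) := by
  induction l with
  | nil => simp
  | cons a l ih =>
    by_cases hp : p a
    · rw [List.dropWhile_cons_of_pos hp]
      rcases eq_or_ne (List.rdropWhile p l) [] with h | h
      · have h2 : List.rdropWhile p (a :: l) = [] := by
          rw [List.rdropWhile_eq_nil_iff] at h ⊢
          intro x hx
          rcases List.mem_cons.mp hx with rfl | hx
          · exact hp
          · exact h x hx
        rw [h2, ← ih, h]
      · have h2 : List.rdropWhile p (a :: l) = a :: List.rdropWhile p l := by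
          have hne : List.dropWhile p l.reverse ≠ [] := by
            intro hc
            exact h (by simp [List.rdropWhile, hc])
          simp only [List.rdropWhile, List.reverse_cons, List.dropWhile_append]
          simp [hne]
        rw [h2, List.dropWhile_cons_of_pos hp, ih]
    · rw [List.dropWhile_cons_of_neg hp]
      have h2 : List.rdropWhile p (a :: l) = a :: List.rdropWhile p l := by
        simp only [List.rdropWhile, List.reverse_cons, List.dropWhile_append]
        by_cases hc : List.dropWhile p l.reverse = []
        · simp [hc, hp]
        · simp [hc]
      rw [h2, List.dropWhile_cons_of_neg hp]

theorem eos_strip_rstrip (s : List Char) :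
    PySem.Chars.strip (PySem.Chars.rstrip s) = PySem.Chars.strip s := by
  show List.rdropWhile _ (List.dropWhile _ (List.rdropWhile _ s))
     = List.rdropWhile _ (List.dropWhile _ s)
  rw [eos_dropWhile_rdropWhile_comm, List.rdropWhile_idempotent]

theorem eos_strip_rstrip_str (s : String) :
    PySem.Str.strip (PySem.Str.rstrip s) = PySem.Str.strip s := by
  simp [PySem.Str.strip, PySem.Str.rstrip, eos_strip_rstrip]

theorem eosAStep_eq_stepL (st : Bool × Bool) (raw : String) :
    eosAStep st raw = eosStepL st (eosLow raw) := by
  simp [eosAStep, eosStepL, eosLow, eos_strip_rstrip_str]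

theorem eos_foldA_eq (lines : List String) (st : Bool × Bool) :
    lines.foldl eosAStep st = (lines.map eosLow).foldl eosStepL st := by
  induction lines generalizing st with
  | nil => simp only [List.map_nil, List.foldl_nil]
  | cons l ls ih => rw [List.foldl_cons, List.map_cons, List.foldl_cons, eosAStep_eq_stepL, ih]

-- the in_mgmt1 component of A's fold, over stripped/lowered lines
def eosInUpd (i : Bool) (low : String) : Bool :=
  if eosIsHeader low then true else if eosIsBound low then false else i

-- B's backward search over the reversed prefix = A's forward in_mgmt1 fold (from initial false)
theorem eos_inBlock_eq (xs : List String) :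
    eosInBlock xs.reverse = xs.foldl eosInUpd false := by
  induction xs using List.reverseRecOn with
  | nil => rfl
  | append_singleton ys y ih =>
    rw [List.reverse_append, List.foldl_append]
    simp only [List.reverse_cons, List.reverse_nil, List.nil_append, List.singleton_append,
      eosInBlock, List.foldl_cons, List.foldl_nil, eosInUpd]
    by_cases hH : eosIsHeader y = true
    · simp [hH]
    · by_cases hB : eosIsBound y = true <;> simp [hH, hB, ih]

-- the mgmt_acl_bound component of A's fold = B's range-any of the declarative condition
theorem eos_fold_snd (xs : List String) (i a : Bool) :
    (xs.foldl eosStepL (i, a)).2 =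
      (a || (List.range xs.length).any (fun j =>
        let lj := xs.getD j ""
        eosHasAcl lj && !eosIsHeader lj && !eosIsBound lj && (xs.take j).foldl eosInUpd i)) := by
  induction xs generalizing i a with
  | nil => simp
  | cons l ls ih =>
    simp only [List.foldl_cons, List.length_cons, List.range_succ_eq_map, List.any_cons,
      List.any_map, Function.comp_def]
    rw [ih]
    have hj : ∀ j : ℕ, ((l :: ls).getD (j + 1) "" = ls.getD j "") ∧
        ((l :: ls).take (j + 1) = l :: ls.take j) := by
      intro j; exact ⟨rfl, List.take_succ_cons ..⟩
    have hupd : ∀ j : ℕ, ((l :: ls).take (j + 1)).foldl eosInUpd i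
        = (ls.take j).foldl eosInUpd (eosInUpd i l) := by
      intro j; rw [(hj j).2, List.foldl_cons]
    simp only [List.getD_cons_zero, List.take_zero, List.foldl_nil, (hj _).1, hupd]
    have hstep : eosStepL (i, a) l =
        (eosInUpd i l, a || (eosHasAcl l && !eosIsHeader l && !eosIsBound l && i)) := by
      simp only [eosStepL, eosInUpd]
      by_cases hH : eosIsHeader l = true
      · simp [hH]
      · by_cases hB : eosIsBound l = true
        · cases i <;> simp [hH, hB]
        · cases i <;> cases hA : eosHasAcl l <;> simp [hH, hB]
    rw [hstep]
    cases a <;> simp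

theorem eos_any_congr {α : Type} (xs : List α) (p q : α → Bool)
    (h : ∀ x ∈ xs, p x = q x) : xs.any p = xs.any q := by
  induction xs with
  | nil => rfl
  | cons x xs ih => simp [List.any_cons, h x (List.mem_cons_self ..),
      ih (fun y hy => h y (List.mem_cons_of_mem _ hy))]

theorem eos_contains_eq (lows : List String) :
    lows.contains "management ssh" = lows.any (fun l => l == "management ssh") := by
  induction lows with
  | nil => rfl
  | cons l ls ih =>
    rw [List.contains_cons, List.any_cons, ih]
    congr 1
    by_cases h : l = "management ssh"
    · subst h; rfl
    · rw [beq_eq_false_iff_ne.mpr (Ne.symm h), beq_eq_false_iff_ne.mpr h]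

-- ===== VERDICT (by name: the statement is the Claim_ definition above) =====
theorem eos_management_controls_py_spec : Claim_equal_eos_management_controls_py := by
  intro lines _
  unfold Spec_eos_management_controls_py eos_management_controls_py eos_management_controls_py_alt
  simp only [eos_foldA_eq, eos_fold_snd, Bool.false_or, List.any_map, List.length_map,
    Function.comp_def, eos_contains_eq]
  have hacl : (List.range lines.length).any (fun j =>
        let lj := (lines.map eosLow).getD j ""
        eosHasAcl lj && !eosIsHeader lj && !eosIsBound lj &&
          ((lines.map eosLow).take j).foldl eosInUpd false)
      = (List.range lines.length).any (fun j =>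
        let lj := (lines.map eosLow).getD j ""
        eosHasAcl lj && !eosIsHeader lj && !eosIsBound lj &&
          eosInBlock (((lines.map eosLow).take j).reverse)) := by
    refine eos_any_congr _ _ _ (fun j _ => ?_)
    rw [eos_inBlock_eq]
  rw [hacl]
  simp only [eosLow]
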